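-- pv_equiv track=rewrite | github.com/kouqhar/codewars | 08-03-2026/smallest_gap.py | smallest_gap
-- ===== SOURCE A (Python) =====
-- def smallest_gap(s):
--     last_seen, min_gap, result = {}, len(s) + 1, ""
--
--     for current_index, char in enumerate(s):
--         if char in last_seen:
--             prev_index = last_seen[char]
--             gap_len = current_index - prev_index - 1
--
--             if gap_len < min_gap:
--                 min_gap, result = gap_len, s[prev_index + 1 : current_index]
--
--         last_seen[char] = current_index
--
--     return result
-- ===== SOURCE B (Python) =====
-- def smallest_gap(s):
--     positions = {}
--     for i, ch in enumerate(s):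
--         positions.setdefault(ch, []).append(i)
--     pairs = [(cur - prev - 1, cur)
--              for idxs in positions.values()
--              for prev, cur in zip(idxs, idxs[1:])]
--     if not pairs:
--         return ""
--     gap, cur = min(pairs)
--     return s[cur - gap : cur]
-- ===== Notes on version B (the rewrite author's own statement) =====
-- stated objective: alternative
-- what changed: A's single pass maintaining a last-seen dict and a running minimum-substring is replaced by building a char-to-ordered-index-positions table, generating all consecutive-occurrence (gap, index) pairs, and taking their lexicographic minimum, slicing only once at the end.
import Mathlib
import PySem

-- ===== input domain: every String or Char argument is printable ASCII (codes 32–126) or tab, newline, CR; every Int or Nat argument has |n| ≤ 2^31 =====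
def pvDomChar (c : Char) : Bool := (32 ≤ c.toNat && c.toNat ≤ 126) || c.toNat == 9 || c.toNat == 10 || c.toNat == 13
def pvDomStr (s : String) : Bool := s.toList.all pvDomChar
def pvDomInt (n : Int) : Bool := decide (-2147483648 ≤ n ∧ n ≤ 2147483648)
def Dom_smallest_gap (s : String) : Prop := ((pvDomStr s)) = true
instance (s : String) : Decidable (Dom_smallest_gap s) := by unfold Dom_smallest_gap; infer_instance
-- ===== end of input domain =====

-- B replaces A's single pass with a last-seen dict by a group-by-character index table followed by a
-- lexicographic minimum over consecutive-occurrence pairs (objective: alternative decomposition, same cost).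

-- ===== PORT A =====
def smallest_gap (s : String) : String :=
  let cs := s.toList
  let st := (PySem.List.enumerate cs 0).foldl
    (fun (st : PySem.Dict Char Int × Int × List Char) p =>
      let last_seen := st.1
      let min_gap := st.2.1
      let result := st.2.2
      let current_index := p.1
      let char := p.2
      let st1 :=
        if last_seen.contains char then
          let prev_index := last_seen.getD char 0
          let gap_len := current_index - prev_index - 1
          if gap_len < min_gap then
            (gap_len, PySem.List.slice cs (some (prev_index + 1)) (some current_index))
          else (min_gap, result)
        else (min_gap, result)
      (last_seen.insert char current_index, st1.1, st1.2))
    (PySem.Dict.empty, (cs.length : Int) + 1, ([] : List Char))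
  String.ofList st.2.2

-- ===== PORT B =====
def smallest_gap_alt (s : String) : String :=
  let cs := s.toList
  let positions := (PySem.List.enumerate cs 0).foldl
    (fun (d : PySem.Dict Char (List Int)) p => d.modify p.2 [] (fun l => l ++ [p.1]))
    PySem.Dict.empty
  let pairs := positions.values.flatMap
    (fun idxs => (idxs.zip (PySem.List.slice idxs (some 1) none)).map
      (fun pc => (pc.2 - pc.1 - 1, pc.2)))
  match PySem.List.min2? pairs (fun p => p.1) (fun p => p.2) with
  | none => ""
  | some m => String.ofList (PySem.List.slice cs (some (m.2 - m.1)) (some m.2))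

-- ===== PRECONDITION & SPEC =====
def Spec_smallest_gap (s : String) (out : String) : Prop := out = smallest_gap_alt s
instance (s : String) (out : String) : Decidable (Spec_smallest_gap s out) := by unfold Spec_smallest_gap; infer_instance

-- ===== CLAIM (what is proved, stated in full; the proofs are below) =====
def Claim_equal_smallest_gap : Prop := ∀ (s : String), Dom_smallest_gap s → Spec_smallest_gap s (smallest_gap s)

-- ===== LEMMAS AND PROOFS =====

-- p and q are consecutive occurrences of the same character in cs
def pvAdj (cs : List Char) (p q : Nat) : Prop :=
  p < q ∧ q < cs.length ∧ cs[p]? = cs[q]? ∧ ∀ k : Nat, p < k → k < q → cs[k]? ≠ cs[q]?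

-- the (gap, second index) pair of a consecutive-occurrence pair
def pvMemAdj (cs : List Char) (x : Int × Int) : Prop :=
  ∃ p q : Nat, pvAdj cs p q ∧ x = ((q : Int) - (p : Int) - 1, (q : Int))

-- indices at which c occurs in cs, in order
def pvOcc (cs : List Char) (c : Char) : List Int :=
  ((PySem.List.enumerate cs 0).filter (fun p => p.2 == c)).map (·.1)

-- lexicographic ≤ on (gap, index) pairs
def pvLex (a b : Int × Int) : Prop := a.1 < b.1 ∨ (a.1 = b.1 ∧ a.2 ≤ b.2)

-- A's dict after a prefix
def pvDictFrom (d : PySem.Dict Char Int) (l : List (Int × Char)) : PySem.Dict Char Int :=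
  l.foldl (fun d p => d.insert p.2 p.1) d

-- the (prev, cur) candidate pairs A's branch fires on, in order
def pvCands (d : PySem.Dict Char Int) : List (Int × Char) → List (Int × Int)
  | [] => []
  | p :: t =>
    (match d.get? p.2 with | some q => [(q, p.1)] | none => []) ++ pvCands (d.insert p.2 p.1) t

-- A's min-gap update step, replayed over the candidate list
def pvStepA (cs : List Char) (st : Int × List Char) (e : Int × Int) : Int × List Char :=
  if e.2 - e.1 - 1 < st.1 then
    (e.2 - e.1 - 1, PySem.List.slice cs (some (e.1 + 1)) (some e.2))
  else st

lemma pvFoldA (cs : List Char) :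
    ∀ (l : List (Int × Char)) (d : PySem.Dict Char Int) (m : Int) (r : List Char),
      l.foldl
        (fun (st : PySem.Dict Char Int × Int × List Char) p =>
          let last_seen := st.1
          let min_gap := st.2.1
          let result := st.2.2
          let current_index := p.1
          let char := p.2
          let st1 :=
            if last_seen.contains char then
              let prev_index := last_seen.getD char 0
              let gap_len := current_index - prev_index - 1
              if gap_len < min_gap then
                (gap_len, PySem.List.slice cs (some (prev_index + 1)) (some current_index))
              else (min_gap, result)
            else (min_gap, result)
          (last_seen.insert char current_index, st1.1, st1.2))
        (d, m, r)
      = (pvDictFrom d l, (pvCands d l).foldl (pvStepA cs) (m, r)) := by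
  intro l
  induction l with
  | nil => intro d m r; rfl
  | cons p t ih =>
    intro d m r
    simp only [List.foldl_cons, pvCands, pvDictFrom]
    rcases hg : d.get? p.2 with _ | q
    · have hc : d.contains p.2 = false := by
        rw [PySem.Dict.contains_eq_isSome_get?, hg]; rfl
      simp only [hc, Bool.false_eq_true, if_false, List.nil_append]
      exact ih (d.insert p.2 p.1) m r
    · have hc : d.contains p.2 = true := by
        rw [PySem.Dict.contains_eq_isSome_get?, hg]; rfl
      have hgd : d.getD p.2 0 = q := PySem.Dict.getD_of_get?_eq_some d 0 hg
      simp only [hc, if_true, hgd, List.cons_append, List.nil_append, List.foldl_cons]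
      rw [ih (d.insert p.2 p.1)]
      have : ((if p.1 - q - 1 < m then (p.1 - q - 1, PySem.List.slice cs (some (q + 1)) (some p.1)) else (m, r)).1,
          (if p.1 - q - 1 < m then (p.1 - q - 1, PySem.List.slice cs (some (q + 1)) (some p.1)) else (m, r)).2)
          = pvStepA cs (m, r) (q, p.1) := by
        simp only [pvStepA]
      rw [this]
      rfl

lemma pvCands_append (d : PySem.Dict Char Int) (l1 l2 : List (Int × Char)) :
    pvCands d (l1 ++ l2) = pvCands d l1 ++ pvCands (pvDictFrom d l1) l2 := by
  induction l1 generalizing d with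
  | nil => rfl
  | cons p t ih =>
    simp only [List.cons_append, pvCands, pvDictFrom, List.foldl_cons, List.append_assoc]
    rw [ih (d.insert p.2 p.1)]
    rfl

lemma pvOcc_mem (cs : List Char) (c : Char) (i : Int) :
    i ∈ pvOcc cs c ↔ ∃ (k : Nat) (_ : k < cs.length), i = (k : Int) ∧ cs[k]? = some c := by
  simp only [pvOcc, List.mem_map, List.mem_filter, PySem.List.mem_enumerate_iff]
  constructor
  · rintro ⟨⟨j, ch⟩, ⟨⟨k, hk, hpair⟩, hc⟩, hi⟩
    cases hpair
    refine ⟨k, hk, by simpa using hi.symm, ?_⟩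
    simp only [beq_iff_eq] at hc
    simp [List.getElem?_eq_getElem hk, hc]
  · rintro ⟨k, hk, hi, hck⟩
    refine ⟨((k : Int), cs[k]), ⟨⟨k, hk, by simp⟩, ?_⟩, by simpa using hi.symm⟩
    have : cs[k] = c := by
      have := List.getElem?_eq_getElem hk
      rw [this] at hck; exact Option.some.inj hck
    simp [this]

lemma pvOcc_sorted (cs : List Char) (c : Char) : (pvOcc cs c).Pairwise (· < ·) := by
  have h := PySem.List.pairwise_lt_enumerate (xs := cs) (s := 0)
  exact (List.Pairwise.filter _ h).map _ (fun a b hab => hab)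

lemma pvOcc_append (cs : List Char) (x : Char) (c : Char) :
    pvOcc (cs ++ [x]) c = pvOcc cs c ++ (if x == c then [(cs.length : Int)] else []) := by
  simp only [pvOcc, PySem.List.enumerate_append, List.filter_append, List.map_append]
  congr 1
  by_cases h : x == c
  · simp [PySem.List.enumerate, h]
  · simp [PySem.List.enumerate, h]

lemma pvLast_max {l : List Int} (hp : l.Pairwise (· < ·)) {a : Int}
    (h : l.getLast? = some a) : a ∈ l ∧ ∀ y ∈ l, y ≤ a := by
  rcases List.getLast?_eq_some_iff.mp h with ⟨l', rfl⟩
  constructor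
  · simp
  · intro y hy
    rcases List.mem_append.mp hy with hy | hy
    · exact le_of_lt ((List.pairwise_append.mp hp).2.2 y hy a (by simp))
    · simp at hy; omega

lemma pvLast_of_max {l : List Int} (hp : l.Pairwise (· < ·)) {a : Int}
    (ha : a ∈ l) (hmax : ∀ y ∈ l, y ≤ a) : l.getLast? = some a := by
  have hne : l ≠ [] := by rintro rfl; simp at ha
  rcases (List.eq_nil_or_concat l).resolve_left hne with ⟨l', b, rfl⟩
  simp only [List.concat_eq_append] at *
  have hb : b ≤ a := hmax b (by simp)
  rcases List.mem_append.mp ha with hy | hy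
  · exact absurd ((List.pairwise_append.mp hp).2.2 a hy b (by simp)) (by omega)
  · simp at hy
    subst hy
    simp

lemma pvDict_get (cs : List Char) (c : Char) :
    (pvDictFrom PySem.Dict.empty (PySem.List.enumerate cs 0)).get? c = (pvOcc cs c).getLast? := by
  induction cs using List.reverseRecOn with
  | nil => rfl
  | append_singleton cs x ih =>
    rw [PySem.List.enumerate_append]
    unfold pvDictFrom
    rw [List.foldl_append]
    simp only [PySem.List.enumerate, List.foldl_cons, List.foldl_nil]
    rw [pvOcc_append]
    by_cases hxc : x = c
    · subst hxc
      rw [PySem.Dict.get?_insert_self]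
      simp
    · rw [PySem.Dict.get?_insert_of_ne _ _ (Ne.symm hxc)]
      have : (x == c) = false := by simp [hxc]
      rw [this]
      simpa using ih


-- adjacency only looks at positions ≤ q
lemma pvAdj_append_iff (cs : List Char) (t : List Char) (p q : Nat) (hq : q < cs.length) :
    pvAdj (cs ++ t) p q ↔ pvAdj cs p q := by
  unfold pvAdj
  have hget : ∀ k : Nat, k < cs.length → (cs ++ t)[k]? = cs[k]? := by
    intro k hk
    rw [List.getElem?_append_left hk]
  constructor
  · rintro ⟨h1, h2, h3, h4⟩
    refine ⟨h1, hq, ?_, ?_⟩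
    · rw [← hget p (h1.trans hq), ← hget q hq]; exact h3
    · intro k hk1 hk2
      rw [← hget k (hk2.trans hq), ← hget q hq]
      exact h4 k hk1 hk2
  · rintro ⟨h1, h2, h3, h4⟩
    refine ⟨h1, by simp; omega, ?_, ?_⟩
    · rw [hget p (h1.trans hq), hget q hq]; exact h3
    · intro k hk1 hk2
      rw [hget k (hk2.trans hq), hget q hq]
      exact h4 k hk1 hk2

-- the candidate list of A = all consecutive-occurrence pairs
lemma pvCands_mem (cs : List Char) (x : Int × Int) :
    x ∈ pvCands PySem.Dict.empty (PySem.List.enumerate cs 0) ↔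
      ∃ p q : Nat, pvAdj cs p q ∧ x = ((p : Int), (q : Int)) := by
  induction cs using List.reverseRecOn with
  | nil =>
    simp only [PySem.List.enumerate, pvCands]
    constructor
    · intro h; simp at h
    · rintro ⟨p, q, ⟨_, hq, _⟩, _⟩; simp at hq
  | append_singleton cs y ih =>
    rw [PySem.List.enumerate_append, pvCands_append]
    have hdict := pvDict_get cs y
    simp only [List.mem_append, ih]
    constructor
    · rintro (⟨p, q, hadj, rfl⟩ | hnew)
      · exact ⟨p, q, (pvAdj_append_iff cs [y] p q hadj.2.1).mpr hadj, rfl⟩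
      · simp only [PySem.List.enumerate, pvCands, hdict, List.append_nil] at hnew
        rcases hlast : (pvOcc cs y).getLast? with _ | a
        · rw [hlast] at hnew; simp at hnew
        · rw [hlast] at hnew
          simp only [List.mem_singleton] at hnew
          subst hnew
          obtain ⟨hmem, hmax⟩ := pvLast_max (pvOcc_sorted cs y) hlast
          rcases (pvOcc_mem cs y a).mp hmem with ⟨p, hp, rfl, hcp⟩
          refine ⟨p, cs.length, ⟨hp, by simp, ?_, ?_⟩, by simp⟩
          · rw [List.getElem?_append_left hp, List.getElem?_concat_length, hcp]
          · intro k hk1 hk2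
            rw [List.getElem?_append_left hk2, List.getElem?_concat_length]
            intro hck
            have : (k : Int) ∈ pvOcc cs y := (pvOcc_mem cs y k).mpr ⟨k, hk2, rfl, hck⟩
            have := hmax _ this
            omega
    · rintro ⟨p, q, hadj, rfl⟩
      by_cases hq : q < cs.length
      · exact Or.inl ⟨p, q, (pvAdj_append_iff cs [y] p q hq).mp hadj, rfl⟩
      · right
        obtain ⟨hpq, hqlen, heq, hbet⟩ := hadj
        have hqeq : q = cs.length := by simp at hqlen; omega
        subst hqeq
        have hys : (cs ++ [y])[cs.length]? = some y := (List.getElem?_concat_length (l := cs) (a := y))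
        have hcp : cs[p]? = some y := by
          rw [← List.getElem?_append_left hpq, heq, hys]
        have hpmem : (p : Int) ∈ pvOcc cs y := (pvOcc_mem cs y p).mpr ⟨p, hpq, rfl, hcp⟩
        have hmax : ∀ z ∈ pvOcc cs y, z ≤ (p : Int) := by
          intro z hz
          rcases (pvOcc_mem cs y z).mp hz with ⟨k, hk, rfl, hck⟩
          by_contra hcon
          have hpk : p < k := by omega
          exact hbet k hpk hk (by rw [List.getElem?_append_left hk, hck, hys])
        have hlast := pvLast_of_max (pvOcc_sorted cs y) hpmem hmax
        simp only [PySem.List.enumerate, pvCands, hdict, List.append_nil, hlast]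
        simp

lemma pvCands_sorted (cs : List Char) :
    (pvCands PySem.Dict.empty (PySem.List.enumerate cs 0)).Pairwise (fun a b => a.2 < b.2) := by
  induction cs using List.reverseRecOn with
  | nil => simp [PySem.List.enumerate, pvCands]
  | append_singleton cs y ih =>
    rw [PySem.List.enumerate_append, pvCands_append]
    rw [List.pairwise_append]
    refine ⟨ih, ?_, ?_⟩
    · rcases hlast : (pvDictFrom PySem.Dict.empty (PySem.List.enumerate cs 0)).get? y with _ | a
      · simp [PySem.List.enumerate, pvCands, hlast]
      · simp [PySem.List.enumerate, pvCands, hlast]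
    · intro a ha b hb
      rcases (pvCands_mem cs a).mp ha with ⟨p, q, hadj, rfl⟩
      simp only [PySem.List.enumerate, pvCands, List.append_nil] at hb
      rcases hl : (pvDictFrom PySem.Dict.empty (PySem.List.enumerate cs 0)).get? y with _ | c
      · rw [hl] at hb; simp at hb
      · rw [hl] at hb
        simp only [List.mem_singleton] at hb
        subst hb
        have : q < cs.length := hadj.2.1
        simp
        omega

-- A's strict-< fold over a cur-increasing candidate list computes the lexicographic minimum
lemma pvFoldMin (cs : List Char) (L : List (Int × Int)) (m0 : Int) (r0 : List Char)
    (hord : L.Pairwise (fun a b => a.2 < b.2)) (hbnd : ∀ e ∈ L, e.2 - e.1 - 1 < m0) :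
    (L = [] ∧ L.foldl (pvStepA cs) (m0, r0) = (m0, r0)) ∨
    (∃ e ∈ L,
      L.foldl (pvStepA cs) (m0, r0)
        = (e.2 - e.1 - 1, PySem.List.slice cs (some (e.1 + 1)) (some e.2)) ∧
      ∀ y ∈ L, pvLex (e.2 - e.1 - 1, e.2) (y.2 - y.1 - 1, y.2)) := by
  induction L using List.reverseRecOn with
  | nil => exact Or.inl ⟨rfl, rfl⟩
  | append_singleton L x ih =>
    have hordL : L.Pairwise (fun a b => a.2 < b.2) := (List.pairwise_append.mp hord).1
    have hbndL : ∀ e ∈ L, e.2 - e.1 - 1 < m0 := fun e he => hbnd e (List.mem_append_left _ he)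
    have hxlt : ∀ e ∈ L, e.2 < x.2 := fun e he =>
      (List.pairwise_append.mp hord).2.2 e he x (by simp)
    rw [List.foldl_append]
    rcases ih hordL hbndL with ⟨rfl, heq⟩ | ⟨e, he, heq, hmin⟩
    · simp only [List.foldl_nil, List.foldl_cons]
      have hx : x.2 - x.1 - 1 < m0 := hbnd x (by simp)
      right
      refine ⟨x, by simp, ?_, ?_⟩
      · simp [pvStepA, hx]
      · intro y hy
        simp at hy
        subst hy
        exact Or.inr ⟨rfl, le_refl _⟩
    · rw [heq]
      simp only [List.foldl_cons, List.foldl_nil]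
      by_cases hlt : x.2 - x.1 - 1 < e.2 - e.1 - 1
      · right
        refine ⟨x, by simp, ?_, ?_⟩
        · simp [pvStepA, hlt]
        · intro y hy
          rcases List.mem_append.mp hy with hy | hy
          · rcases hmin y hy with h | ⟨h1, h2⟩
            · exact Or.inl (by omega)
            · exact Or.inl (by omega)
          · simp at hy; subst hy; exact Or.inr ⟨rfl, le_refl _⟩
      · right
        refine ⟨e, List.mem_append_left _ he, ?_, ?_⟩
        · simp [pvStepA, hlt]
        · intro y hy
          rcases List.mem_append.mp hy with hy | hy
          · exact hmin y hy
          · simp at hy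
            subst hy
            rcases lt_or_eq_of_le (not_lt.mp hlt) with h | h
            · exact Or.inl h
            · exact Or.inr ⟨h.symm ▸ rfl, le_of_lt (hxlt e he)⟩

-- min2? on pairs is the first lexicographic minimum
def pvStepB (acc : Option (Int × Int)) (x : Int × Int) : Option (Int × Int) :=
  match acc with
  | none => some x
  | some mm =>
    if (decide (x.1 < mm.1) || !decide (mm.1 < x.1) && decide (x.2 < mm.2)) = true
    then some x else some mm

lemma pvMin2_eq (P : List (Int × Int)) :
    PySem.List.min2? P (fun p => p.1) (fun p => p.2) = P.foldl pvStepB none := by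
  unfold PySem.List.min2?
  congr 1
  funext acc x
  cases acc <;> rfl

lemma pvMin2_aux (P : List (Int × Int)) :
    ∀ m : Int × Int, ∃ m',
      P.foldl pvStepB (some m) = some m' ∧ (m' = m ∨ m' ∈ P) ∧ pvLex m' m ∧ ∀ y ∈ P, pvLex m' y := by
  induction P with
  | nil => exact fun m => ⟨m, rfl, Or.inl rfl, Or.inr ⟨rfl, le_refl _⟩, by simp⟩
  | cons x t ih =>
    intro m
    simp only [List.foldl_cons]
    have hstep : pvStepB (some m) x = if (decide (x.1 < m.1) || !decide (m.1 < x.1) && decide (x.2 < m.2)) = true then some x else some m := rfl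
    rw [hstep]
    by_cases hc : (decide (x.1 < m.1) || !decide (m.1 < x.1) && decide (x.2 < m.2)) = true
    · rw [if_pos hc]
      rcases ih x with ⟨m', hm', hmem, hlex, hall⟩
      have hxm : pvLex x m := by
        simp only [Bool.or_eq_true, Bool.and_eq_true, decide_eq_true_eq,
          Bool.not_eq_true', decide_eq_false_iff_not] at hc
        rcases hc with h | ⟨h1, h2⟩
        · exact Or.inl h
        · rcases lt_or_eq_of_le (not_lt.mp h1) with h' | h'
          · exact Or.inl h'
          · exact Or.inr ⟨h', le_of_lt h2⟩
      refine ⟨m', hm', ?_, ?_, ?_⟩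
      · rcases hmem with rfl | h
        · exact Or.inr (by simp)
        · exact Or.inr (List.mem_cons_of_mem _ h)
      · unfold pvLex at *; rcases hlex with h | h <;> rcases hxm with h' | h' <;>
          [exact Or.inl (by omega); exact Or.inl (by omega); exact Or.inl (by omega);
           exact Or.inr ⟨by omega, by omega⟩]
      · intro y hy
        rcases List.mem_cons.mp hy with rfl | hy
        · exact hlex
        · exact hall y hy
    · rw [if_neg hc]
      rcases ih m with ⟨m', hm', hmem, hlex, hall⟩
      have hmx : pvLex m x := by
        simp only [Bool.or_eq_true, Bool.and_eq_true, decide_eq_true_eq,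
          Bool.not_eq_true', decide_eq_false_iff_not] at hc
        rw [not_or, not_and] at hc
        rcases lt_trichotomy m.1 x.1 with h | h | h
        · exact Or.inl h
        · have h2 := hc.2 (by omega)
          exact Or.inr ⟨h, by omega⟩
        · exact absurd h (by have := hc.1; omega)
      refine ⟨m', hm', ?_, hlex, ?_⟩
      · rcases hmem with rfl | h
        · exact Or.inl rfl
        · exact Or.inr (List.mem_cons_of_mem _ h)
      · intro y hy
        rcases List.mem_cons.mp hy with rfl | hy
        · unfold pvLex at *; rcases hlex with h | h <;> rcases hmx with h' | h' <;>
            [exact Or.inl (by omega); exact Or.inl (by omega); exact Or.inl (by omega);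
             exact Or.inr ⟨by omega, by omega⟩]
        · exact hall y hy

lemma pvMin2_nil (P : List (Int × Int)) (h : P = []) :
    PySem.List.min2? P (fun p => p.1) (fun p => p.2) = none := by
  subst h; rfl

lemma pvMin2_some (P : List (Int × Int)) (h : P ≠ []) :
    ∃ m, PySem.List.min2? P (fun p => p.1) (fun p => p.2) = some m ∧
      m ∈ P ∧ ∀ y ∈ P, pvLex m y := by
  rcases P with _ | ⟨x, t⟩
  · exact absurd rfl h
  · rcases pvMin2_aux t x with ⟨m', hm', hmem, hlex, hall⟩
    refine ⟨m', ?_, ?_, ?_⟩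
    · rw [pvMin2_eq]
      simpa using hm'
    · rcases hmem with rfl | h'
      · simp
      · exact List.mem_cons_of_mem _ h'
    · intro y hy
      rcases List.mem_cons.mp hy with rfl | hy
      · exact hlex
      · exact hall y hy

-- membership in zip-with-tail = adjacent entries
lemma pvZip_tail_mem (l : List Int) (a b : Int) :
    (a, b) ∈ l.zip l.tail ↔
      ∃ n : Nat, ∃ _ : n + 1 < l.length, l[n]? = some a ∧ l[n + 1]? = some b := by
  rw [List.mem_iff_getElem]
  have hlen : (l.zip l.tail).length = l.length - 1 := by
    rw [List.length_zip, List.length_tail]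
    omega
  constructor
  · rintro ⟨i, h, hi⟩
    have h1 : i < l.length := by omega
    have h2 : i < l.tail.length := by rw [List.length_tail]; omega
    have h3 : i + 1 < l.length := by omega
    rw [List.getElem_zip] at hi
    refine ⟨i, h3, ?_, ?_⟩
    · rw [List.getElem?_eq_getElem h1]
      exact congrArg some (congrArg Prod.fst hi)
    · rw [List.getElem?_eq_getElem h3]
      have : l.tail[i] = l[i + 1] := List.getElem_tail h2
      rw [this] at hi
      exact congrArg some (congrArg Prod.snd hi)
  · rintro ⟨n, hn, ha, hb⟩
    have h1 : n < l.length := by omega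
    refine ⟨n, by omega, ?_⟩
    rw [List.getElem_zip]
    have h2 : n < l.tail.length := by rw [List.length_tail]; omega
    have ht : l.tail[n] = l[n + 1] := List.getElem_tail h2
    rw [List.getElem?_eq_getElem h1] at ha
    rw [List.getElem?_eq_getElem hn] at hb
    rw [ht]
    exact Prod.ext (Option.some.inj ha) (Option.some.inj hb)

-- zip-adjacency in an occurrence list = pvAdj
lemma pvOcc_zip_adj (cs : List Char) (c : Char) (a b : Int) :
    (a, b) ∈ (pvOcc cs c).zip (pvOcc cs c).tail ↔
      ∃ p q : Nat, a = (p : Int) ∧ b = (q : Int) ∧ pvAdj cs p q ∧ cs[q]? = some c := by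
  have hs := pvOcc_sorted cs c
  have hmono := List.pairwise_iff_getElem.mp hs
  rw [pvZip_tail_mem]
  constructor
  · rintro ⟨n, hn, ha, hb⟩
    have h1 : n < (pvOcc cs c).length := by omega
    rw [List.getElem?_eq_getElem h1] at ha
    rw [List.getElem?_eq_getElem hn] at hb
    have hma : a ∈ pvOcc cs c := Option.some.inj ha ▸ List.getElem_mem h1
    have hmb : b ∈ pvOcc cs c := Option.some.inj hb ▸ List.getElem_mem hn
    rcases (pvOcc_mem cs c a).mp hma with ⟨p, hp, rfl, hcp⟩
    rcases (pvOcc_mem cs c b).mp hmb with ⟨q, hq, rfl, hcq⟩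
    have hpq : (p : Int) < (q : Int) := by
      have := hmono n (n + 1) (by omega) hn (by omega)
      rw [Option.some.inj ha, Option.some.inj hb] at this
      exact this
    refine ⟨p, q, rfl, rfl, ⟨by exact_mod_cast hpq, hq, by rw [hcp, hcq], ?_⟩, hcq⟩
    intro k hk1 hk2 hck
    rw [hcq] at hck
    have hkmem : (k : Int) ∈ pvOcc cs c := (pvOcc_mem cs c k).mpr ⟨k, by omega, rfl, hck⟩
    rcases List.mem_iff_getElem.mp hkmem with ⟨i, hi, hik⟩
    rcases Nat.lt_or_ge i (n + 1) with h | h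
    · rcases Nat.lt_or_ge i n with h' | h'
      · have := hmono i n (by omega) h1 h'
        rw [hik, Option.some.inj ha] at this
        omega
      · have : i = n := by omega
        subst this
        rw [Option.some.inj ha] at hik
        omega
    · rcases Nat.lt_or_ge (n + 1) i with h' | h'
      · have := hmono (n + 1) i (by omega) hi h'
        rw [hik, Option.some.inj hb] at this
        omega
      · have : i = n + 1 := by omega
        subst this
        rw [Option.some.inj hb] at hik
        omega
  · rintro ⟨p, q, rfl, rfl, ⟨hpq, hq, heq, hbet⟩, hcq⟩
    have hcp : cs[p]? = some c := by rw [heq, hcq]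
    have hpm : (p : Int) ∈ pvOcc cs c := (pvOcc_mem cs c p).mpr ⟨p, by omega, rfl, hcp⟩
    have hqm : (q : Int) ∈ pvOcc cs c := (pvOcc_mem cs c q).mpr ⟨q, hq, rfl, hcq⟩
    rcases List.mem_iff_getElem.mp hpm with ⟨n, hn, hnp⟩
    rcases List.mem_iff_getElem.mp hqm with ⟨m, hm, hmq⟩
    have hnm : n < m := by
      by_contra hcon
      rcases Nat.lt_or_ge m n with h | h
      · have := hmono m n (by omega) hn h
        rw [hnp, hmq] at this
        omega
      · have : m = n := by omega
        subst this
        rw [hnp] at hmq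
        omega
    have hm1 : m = n + 1 := by
      by_contra hcon
      have hlt : n + 1 < m := by omega
      have hx : (pvOcc cs c)[n+1] ∈ pvOcc cs c := List.getElem_mem (by omega)
      rcases (pvOcc_mem cs c _).mp hx with ⟨k, hk, hkx, hck⟩
      have hx1 : (pvOcc cs c)[n] < (pvOcc cs c)[n+1] := hmono n (n+1) (by omega) (by omega) (by omega)
      have hx2 : (pvOcc cs c)[n+1] < (pvOcc cs c)[m] := hmono (n+1) m (by omega) hm hlt
      rw [hnp] at hx1
      rw [hmq] at hx2
      rw [hkx] at hx1 hx2
      exact hbet k (by omega) (by omega) (by rw [hck, hcq])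
    subst hm1
    exact ⟨n, hm, by rw [List.getElem?_eq_getElem hn, hnp], by rw [List.getElem?_eq_getElem hm, hmq]⟩

-- B's pair list membership
lemma pvPairsB_mem (cs : List Char) (x : Int × Int) :
    x ∈ ((PySem.List.enumerate cs 0).foldl
          (fun (d : PySem.Dict Char (List Int)) p => d.modify p.2 [] (fun l => l ++ [p.1]))
          PySem.Dict.empty).values.flatMap
        (fun idxs => (idxs.zip (PySem.List.slice idxs (some 1) none)).map
          (fun pc => (pc.2 - pc.1 - 1, pc.2))) ↔ pvMemAdj cs x := by
  have hfold : (PySem.List.enumerate cs 0).foldl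
      (fun (d : PySem.Dict Char (List Int)) p => d.modify p.2 [] (fun l => l ++ [p.1]))
      PySem.Dict.empty
      = ((PySem.List.enumerate cs 0).map Prod.swap).foldl
        (fun (d : PySem.Dict Char (List Int)) q => d.modify q.1 [] (fun l => l ++ [q.2]))
        PySem.Dict.empty := by
    rw [List.foldl_map]
    rfl
  have hkeys : ((PySem.List.enumerate cs 0).foldl
      (fun (d : PySem.Dict Char (List Int)) p => d.modify p.2 [] (fun l => l ++ [p.1]))
      PySem.Dict.empty).keys = PySem.Set.ofList cs := by
    rw [PySem.Dict.keys_foldl_modify_key (key := fun p : Int × Char => p.2)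
      (f := fun (_ : PySem.Dict Char (List Int)) (p : Int × Char) (l : List Int) => l ++ [p.1])]
    rw [PySem.Dict.keys_empty, PySem.List.map_snd_enumerate]
    exact PySem.Set.update_nil_left cs
  have hnodup : ((PySem.List.enumerate cs 0).foldl
      (fun (d : PySem.Dict Char (List Int)) p => d.modify p.2 [] (fun l => l ++ [p.1]))
      PySem.Dict.empty).keys.Nodup := by
    rw [hkeys]; exact PySem.Set.nodup_ofList cs
  have hgetD : ∀ c, ((PySem.List.enumerate cs 0).foldl
      (fun (d : PySem.Dict Char (List Int)) p => d.modify p.2 [] (fun l => l ++ [p.1]))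
      PySem.Dict.empty).getD c [] = pvOcc cs c := by
    intro c
    rw [hfold, PySem.Dict.getD_foldl_modify_append, PySem.Dict.getD_empty]
    simp only [List.filter_map, List.map_map, List.nil_append]
    rfl
  rw [PySem.Dict.values_eq_map_keys _ hnodup [], hkeys]
  simp only [List.mem_flatMap, List.mem_map]
  constructor
  · rintro ⟨idxs, ⟨c, hc, rfl⟩, hx⟩
    rw [hgetD c, PySem.List.slice_from_one] at hx
    rcases hx with ⟨pc, hpc, rfl⟩
    rcases (pvOcc_zip_adj cs c pc.1 pc.2).mp (by simpa using hpc) with ⟨p, q, h1, h2, hadj, _⟩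
    exact ⟨p, q, hadj, by rw [h1, h2]⟩
  · rintro ⟨p, q, hadj, rfl⟩
    have hq := hadj.2.1
    have hcq : cs[q]? = some cs[q] := List.getElem?_eq_getElem hq
    refine ⟨pvOcc cs cs[q],
      ⟨cs[q], (PySem.Set.mem_ofList _ _).mpr (List.getElem_mem hq), by rw [hgetD]⟩, ?_⟩
    rw [PySem.List.slice_from_one]
    exact ⟨((p : Int), (q : Int)),
      (pvOcc_zip_adj cs cs[q] p q).mpr ⟨p, q, rfl, rfl, hadj, hcq⟩, rfl⟩

-- A's candidate list, mapped to (gap, cur), has the same membership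
lemma pvPairsA_mem (cs : List Char) (x : Int × Int) :
    x ∈ (pvCands PySem.Dict.empty (PySem.List.enumerate cs 0)).map
        (fun e => (e.2 - e.1 - 1, e.2)) ↔ pvMemAdj cs x := by
  simp only [List.mem_map]
  constructor
  · rintro ⟨e, he, rfl⟩
    rcases (pvCands_mem cs e).mp he with ⟨p, q, hadj, rfl⟩
    exact ⟨p, q, hadj, rfl⟩
  · rintro ⟨p, q, hadj, rfl⟩
    exact ⟨((p : Int), (q : Int)), (pvCands_mem cs _).mpr ⟨p, q, hadj, rfl⟩, rfl⟩

-- ===== VERDICT (by name: the statement is the Claim_ definition above) =====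
lemma pvMain (cs : List Char) :
    String.ofList (((pvCands PySem.Dict.empty (PySem.List.enumerate cs 0)).foldl
        (pvStepA cs) ((cs.length : Int) + 1, ([] : List Char))).2)
      = (match PySem.List.min2?
            (((PySem.List.enumerate cs 0).foldl
                (fun (d : PySem.Dict Char (List Int)) p => d.modify p.2 [] (fun l => l ++ [p.1]))
                PySem.Dict.empty).values.flatMap
              (fun idxs => (idxs.zip (PySem.List.slice idxs (some 1) none)).map
                (fun pc => (pc.2 - pc.1 - 1, pc.2))))
            (fun p => p.1) (fun p => p.2) with
        | none => ""
        | some m => String.ofList (PySem.List.slice cs (some (m.2 - m.1)) (some m.2))) := by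
  have hbnd : ∀ e ∈ pvCands PySem.Dict.empty (PySem.List.enumerate cs 0),
      e.2 - e.1 - 1 < (cs.length : Int) + 1 := by
    intro e he
    rcases (pvCands_mem cs e).mp he with ⟨p, q, hadj, rfl⟩
    have h1 := hadj.1
    have h2 := hadj.2.1
    simp only
    omega
  rcases pvFoldMin cs _ ((cs.length : Int) + 1) [] (pvCands_sorted cs) hbnd with
    ⟨hnil, heq⟩ | ⟨e, he, heq, hmin⟩
  · have hPB : (((PySem.List.enumerate cs 0).foldl
        (fun (d : PySem.Dict Char (List Int)) p => d.modify p.2 [] (fun l => l ++ [p.1]))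
        PySem.Dict.empty).values.flatMap
          (fun idxs => (idxs.zip (PySem.List.slice idxs (some 1) none)).map
            (fun pc => (pc.2 - pc.1 - 1, pc.2)))) = [] := by
      rw [List.eq_nil_iff_forall_not_mem]
      intro x hx
      rcases (pvPairsB_mem cs x).mp hx with ⟨p, q, hadj, rfl⟩
      have : ((p : Int), (q : Int)) ∈ pvCands PySem.Dict.empty (PySem.List.enumerate cs 0) :=
        (pvCands_mem cs _).mpr ⟨p, q, hadj, rfl⟩
      rw [hnil] at this
      simp at this
    rw [hnil, pvMin2_nil _ hPB]
    simp
  · have hne : (((PySem.List.enumerate cs 0).foldl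
        (fun (d : PySem.Dict Char (List Int)) p => d.modify p.2 [] (fun l => l ++ [p.1]))
        PySem.Dict.empty).values.flatMap
          (fun idxs => (idxs.zip (PySem.List.slice idxs (some 1) none)).map
            (fun pc => (pc.2 - pc.1 - 1, pc.2)))) ≠ [] := by
      intro h0
      have hx : (e.2 - e.1 - 1, e.2) ∈ (pvCands PySem.Dict.empty
          (PySem.List.enumerate cs 0)).map (fun e => (e.2 - e.1 - 1, e.2)) :=
        List.mem_map_of_mem he
      have := (pvPairsB_mem cs _).mpr ((pvPairsA_mem cs _).mp hx)
      rw [h0] at this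
      simp at this
    rcases pvMin2_some _ hne with ⟨m, hm, hmem, hminB⟩
    rw [heq, hm]
    have hkey : m = (e.2 - e.1 - 1, e.2) := by
      have h1 : pvLex (e.2 - e.1 - 1, e.2) m := by
        rcases (pvPairsA_mem cs m).mpr ((pvPairsB_mem cs m).mp hmem) with hx
        rcases List.mem_map.mp hx with ⟨y, hy, rfl⟩
        exact hmin y hy
      have h2 : pvLex m (e.2 - e.1 - 1, e.2) := by
        apply hminB
        exact (pvPairsB_mem cs _).mpr ((pvPairsA_mem cs _).mp (List.mem_map_of_mem he))
      unfold pvLex at h1 h2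
      simp only at h1 h2
      have hfst : m.1 = e.2 - e.1 - 1 := by omega
      have hsnd : m.2 = e.2 := by omega
      exact Prod.ext hfst hsnd
    subst hkey
    simp only
    have harg : e.2 - (e.2 - e.1 - 1) = e.1 + 1 := by ring
    rw [harg]

theorem smallest_gap_spec : Claim_equal_smallest_gap := by
  intro s _
  unfold Spec_smallest_gap
  show smallest_gap s = smallest_gap_alt s
  simp only [smallest_gap, smallest_gap_alt]
  rw [pvFoldA s.toList]
  exact pvMain s.toList
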